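-- pv_equiv track=rewrite | github.com/vaidiksule/getsentimate | backend/youtube_analytics/services/youtube_api_service.py | parse_iso8601_duration
-- ===== SOURCE A (Python) =====
-- def parse_iso8601_duration(duration: str) -> str:
--     """Convert ISO8601 duration (e.g. PT1H2M3S) to HH:MM:SS or MM:SS."""
--     if not duration or not duration.startswith("PT"):
--         return ""
--     hours = minutes = seconds = 0
--     value = ""
--     for ch in duration[2:]:
--         if ch.isdigit():
--             value += ch
--         else:
--             if ch == "H":
--                 hours = int(value or 0)
--             elif ch == "M":
--                 minutes = int(value or 0)
--             elif ch == "S":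
--                 seconds = int(value or 0)
--             value = ""
--     total_seconds = hours * 3600 + minutes * 60 + seconds
--     if total_seconds <= 0:
--         return ""
--     h = total_seconds // 3600
--     m = (total_seconds % 3600) // 60
--     s = total_seconds % 60
--     if h > 0:
--         return f"{h:02d}:{m:02d}:{s:02d}"
--     return f"{m:02d}:{s:02d}"
-- ===== SOURCE B (Python) =====
-- import re
--
--
-- def parse_iso8601_duration(duration: str) -> str:
--     """Convert ISO8601 duration (e.g. PT1H2M3S) to HH:MM:SS or MM:SS."""
--     if not duration or not duration.startswith("PT"):
--         return ""
--     hours = minutes = seconds = 0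
--     for num, unit in re.findall(r"(\d*)([HMS])", duration[2:]):
--         if unit == "H":
--             hours = int(num or 0)
--         elif unit == "M":
--             minutes = int(num or 0)
--         elif unit == "S":
--             seconds = int(num or 0)
--     total_seconds = hours * 3600 + minutes * 60 + seconds
--     if total_seconds <= 0:
--         return ""
--     h = total_seconds // 3600
--     m = (total_seconds % 3600) // 60
--     s = total_seconds % 60
--     if h > 0:
--         return f"{h:02d}:{m:02d}:{s:02d}"
--     return f"{m:02d}:{s:02d}"
-- ===== Notes on version B (the rewrite author's own statement) =====
-- stated objective: idiomatic
-- what changed: Replaced A's char-by-char state machine (digit accumulator with assign-and-reset on every non-digit) by re.findall(r'(\d*)([HMS])') followed by a per-match assignment loop, keeping the guard and HH:MM:SS formatting tail.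
import Mathlib
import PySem

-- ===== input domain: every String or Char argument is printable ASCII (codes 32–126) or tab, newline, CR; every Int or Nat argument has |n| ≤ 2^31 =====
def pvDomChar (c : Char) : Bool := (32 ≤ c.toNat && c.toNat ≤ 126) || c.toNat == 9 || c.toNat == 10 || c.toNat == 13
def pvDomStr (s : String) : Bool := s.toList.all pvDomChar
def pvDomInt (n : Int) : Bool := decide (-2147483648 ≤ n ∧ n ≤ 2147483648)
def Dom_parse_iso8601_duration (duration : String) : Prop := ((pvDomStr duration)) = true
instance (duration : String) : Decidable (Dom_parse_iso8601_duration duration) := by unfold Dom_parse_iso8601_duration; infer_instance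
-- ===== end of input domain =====

-- B replaces A's char-by-char state machine by a regex-style scan (findall of (\d*)([HMS])) followed
-- by a per-match assignment loop; same result, idiomatic decomposition (no speed claim).

-- int(value or 0): `value` is always a run of ASCII digits here, so for nonempty `value`
-- PySem.Int.ofChars? returns `some`; the `.getD 0` default is never reached.
def pvToInt (value : List Char) : Int :=
  if value = [] then 0 else (PySem.Int.ofChars? value).getD 0

-- f"{n:02d}" for the nonnegative values that reach it = str(n) zero-padded to width 2
def pvPad2 (n : Int) : String := PySem.Str.zfill (PySem.Int.toStr n) 2

-- the shared tail of both Pythons: total_seconds -> formatted string (or "" if total <= 0)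
def pvFmt (hours minutes seconds : Int) : String :=
  let total := hours * 3600 + minutes * 60 + seconds
  if total ≤ 0 then ""
  else
    let h := PySem.Int.floordiv total 3600
    let m := PySem.Int.floordiv (PySem.Int.mod total 3600) 60
    let s := PySem.Int.mod total 60
    if h > 0 then pvPad2 h ++ ":" ++ pvPad2 m ++ ":" ++ pvPad2 s
    else pvPad2 m ++ ":" ++ pvPad2 s

-- ===== PORT A =====
-- A's loop body: state = (hours, minutes, seconds, value); `value += ch` / assign-and-reset
def pvStepA (st : Int × Int × Int × List Char) (ch : Char) : Int × Int × Int × List Char :=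
  if PySem.Chars.isdigit ch then (st.1, st.2.1, st.2.2.1, st.2.2.2 ++ [ch])
  else if ch = 'H' then (pvToInt st.2.2.2, st.2.1, st.2.2.1, [])
  else if ch = 'M' then (st.1, pvToInt st.2.2.2, st.2.2.1, [])
  else if ch = 'S' then (st.1, st.2.1, pvToInt st.2.2.2, [])
  else (st.1, st.2.1, st.2.2.1, [])

def parse_iso8601_duration (duration : String) : String :=
  if duration = "" || !(PySem.Str.startswith duration "PT") then ""
  else
    let r := (PySem.List.slice duration.toList (some 2) none).foldl pvStepA (0, 0, 0, [])
    pvFmt r.1 r.2.1 r.2.2.1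

-- ===== PORT B =====
-- hand port of re.findall(r"(\d*)([HMS])", s): left-to-right non-overlapping scan; `acc` is the
-- digit run preceding the current position (exact: the pattern ends in [HMS], so a match is a
-- maximal digit run immediately followed by a unit letter, and failures advance one position)
def pvFindAll (acc : List Char) (l : List Char) : List (List Char × Char) :=
  match l with
  | [] => []
  | c :: t =>
    if PySem.Chars.isdigit c then pvFindAll (acc ++ [c]) t
    else if c ∈ (['H', 'M', 'S'] : List Char) then (acc, c) :: pvFindAll [] t
    else pvFindAll [] t

-- B's loop body over the matches: assign the field named by the unit letter
def pvStepB (st : Int × Int × Int) (p : List Char × Char) : Int × Int × Int :=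
  if p.2 = 'H' then (pvToInt p.1, st.2.1, st.2.2)
  else if p.2 = 'M' then (st.1, pvToInt p.1, st.2.2)
  else if p.2 = 'S' then (st.1, st.2.1, pvToInt p.1)
  else st

def parse_iso8601_duration_alt (duration : String) : String :=
  if duration = "" || !(PySem.Str.startswith duration "PT") then ""
  else
    let r := (pvFindAll [] (PySem.List.slice duration.toList (some 2) none)).foldl pvStepB (0, 0, 0)
    pvFmt r.1 r.2.1 r.2.2

-- ===== PRECONDITION & SPEC =====
def Spec_parse_iso8601_duration (duration : String) (out : String) : Prop := out = parse_iso8601_duration_alt duration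
instance (duration : String) (out : String) : Decidable (Spec_parse_iso8601_duration duration out) := by unfold Spec_parse_iso8601_duration; infer_instance

-- ===== CLAIM (what is proved, stated in full; the proofs are below) =====
def Claim_equal_parse_iso8601_duration : Prop := ∀ (duration : String), Dom_parse_iso8601_duration duration → Spec_parse_iso8601_duration duration (parse_iso8601_duration duration)

-- ===== LEMMAS AND PROOFS =====

-- A's fold with pending digit run `acc` projects to B's fold over the matches of the rest
theorem pv_loop_eq (l : List Char) : ∀ (acc : List Char) (h m s : Int),
    (let r := l.foldl pvStepA (h, m, s, acc); (r.1, r.2.1, r.2.2.1))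
      = (pvFindAll acc l).foldl pvStepB (h, m, s) := by
  induction l with
  | nil => intro acc h m s; simp [pvFindAll]
  | cons c t ih =>
    intro acc h m s
    by_cases hd : PySem.Chars.isdigit c
    · simpa [pvFindAll, pvStepA, hd] using ih (acc ++ [c]) h m s
    · by_cases hH : c = 'H'
      · simpa [pvFindAll, pvStepA, pvStepB, hd, hH] using ih [] (pvToInt acc) m s
      · by_cases hM : c = 'M'
        · simpa [pvFindAll, pvStepA, pvStepB, hd, hH, hM] using ih [] h (pvToInt acc) s
        · by_cases hS : c = 'S'
          · simpa [pvFindAll, pvStepA, pvStepB, hd, hH, hM, hS] using ih [] h m (pvToInt acc)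
          · simpa [pvFindAll, pvStepA, hd, hH, hM, hS] using ih [] h m s

-- ===== VERDICT (by name: the statement is the Claim_ definition above) =====
theorem parse_iso8601_duration_spec : Claim_equal_parse_iso8601_duration := by
  intro duration _
  unfold Spec_parse_iso8601_duration parse_iso8601_duration parse_iso8601_duration_alt
  by_cases hg : (duration = "" || !(PySem.Str.startswith duration "PT")) = true
  · rw [if_pos hg, if_pos hg]
  · simp only [hg, Bool.false_eq_true, if_false]
    have hk := pv_loop_eq (PySem.List.slice duration.toList (some 2) none) [] 0 0 0
    simp only at hk
    rw [← hk]
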